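-- pv_equiv track=rewrite | github.com/maru65536/Library | halfzrk.py | halfzrk
-- ===== SOURCE A (Python) =====
-- def halfzrk(l):
--     a,b=l[::2],l[1::2]
--     a1,b1=[],[]
--     for i in range(len(a)):
--         i=bin(i)[2:].zfill(len(a))
--         a1.append(sum([a[j]*int(i[j])for j in range(len(a))]))
--     for i in range(len(b)):
--         i=bin(i)[2:].zfill(len(b))
--         b1.append(sum([b[j]*int(i[j])for j in range(len(b))]))
--     return sorted(a1),sorted(b1)
-- ===== SOURCE B (Python) =====
-- def halfzrk(l):
--     # Subset-sum doubling: build the table of all bit-pattern sums by repeatedly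
--     # appending a shifted copy of itself (one list doubling per bit), then keep
--     # the first n entries and sort; no per-index bit decoding at all.
--     def sums(x):
--         n = len(x)
--         t = [0]
--         k = 1
--         while len(t) < n:
--             w = x[n - k]
--             t = t + [s + w for s in t]
--             k += 1
--         return sorted(t[:n])
--     return sums(l[::2]), sums(l[1::2])
-- ===== Notes on version B (the rewrite author's own statement) =====
-- stated objective: faster
-- what changed: Instead of decoding each index i into its bits (padded binary string scanned position by position), B builds the whole table of bit-pattern sums by subset-sum doubling - repeatedly appending a copy of the table shifted by the next element's value - then truncates to the first n entries and sorts.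
import Mathlib
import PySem

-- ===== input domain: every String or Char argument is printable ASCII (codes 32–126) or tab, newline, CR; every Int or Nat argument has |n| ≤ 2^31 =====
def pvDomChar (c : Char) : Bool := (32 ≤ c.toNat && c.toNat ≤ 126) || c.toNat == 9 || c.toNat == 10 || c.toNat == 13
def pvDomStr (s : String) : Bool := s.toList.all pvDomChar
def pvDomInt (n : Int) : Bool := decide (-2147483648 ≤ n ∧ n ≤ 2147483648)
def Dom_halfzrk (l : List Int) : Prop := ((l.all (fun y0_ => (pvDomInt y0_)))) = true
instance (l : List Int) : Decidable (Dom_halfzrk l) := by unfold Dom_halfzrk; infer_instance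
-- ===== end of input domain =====

-- B replaces A's per-index binary-string decoding (O(n) work per index) by subset-sum
-- doubling: the table of bit-pattern sums is built by repeatedly appending a shifted
-- copy of itself, one doubling per bit (objective: faster).

-- ===== PORT A =====
-- int(s[j]) for the one-character slice s[j]; the default is never taken: every character of the
-- zero-filled binary string is '0' or '1'.
def pyIntOfDigit (c : Char) : Int := (PySem.Int.ofChars? [c]).getD 0

-- one body of A's loop: bin(i)[2:].zfill(len(x)) and the comprehension sum
def rowA (x : List Int) (i : Int) : Int :=
  let s : List Char := PySem.Chars.zfill (PySem.Int.toBinChars i) (PySem.List.len x)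
  (((PySem.List.pyRange 0 (PySem.List.len x) 1).map
      (fun j => PySem.List.pyGetD x j 0 * pyIntOfDigit (PySem.List.pyGetD s j '0')))).sum

def halfzrk (l : List Int) : List Int × List Int :=
  let a := (PySem.List.slice? l none none 2).getD []      -- l[::2]; step ≠ 0, never none
  let b := (PySem.List.slice? l (some 1) none 2).getD []  -- l[1::2]
  let a1 := (PySem.List.pyRange 0 (PySem.List.len a) 1).foldl (fun acc i => acc ++ [rowA a i]) []
  let b1 := (PySem.List.pyRange 0 (PySem.List.len b) 1).foldl (fun acc i => acc ++ [rowA b i]) []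
  (PySem.List.sorted a1 id false, PySem.List.sorted b1 id false)

-- ===== PORT B =====
-- B's while-loop 'while len(t) < n: t = t + [s + x[n-k] for s in t]; k += 1'.
-- The fuel argument only makes the recursion total; sumsB passes x.length + 1, which the
-- loop never exhausts (the table doubles from length 1, so ≤ len(x) doublings happen).
def growT (x : List Int) : Nat → List Int → Nat → List Int
  | 0, t, _ => t
  | fuel + 1, t, k =>
    if t.length < x.length then
      growT x fuel
        (t ++ t.map (fun s => s + PySem.List.pyGetD x ((x.length : Int) - (k : Int)) 0))
        (k + 1)
    else t

def sumsB (x : List Int) : List Int :=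
  PySem.List.sorted ((growT x (x.length + 1) [0] 1).take x.length) id false

def halfzrk_alt (l : List Int) : List Int × List Int :=
  (sumsB ((PySem.List.slice? l none none 2).getD []),
   sumsB ((PySem.List.slice? l (some 1) none 2).getD []))

-- ===== PRECONDITION & SPEC =====
def Spec_halfzrk (l : List Int) (out : List Int × List Int) : Prop := out = halfzrk_alt l
instance (l : List Int) (out : List Int × List Int) : Decidable (Spec_halfzrk l out) := by unfold Spec_halfzrk; infer_instance

-- ===== CLAIM (what is proved, stated in full; the proofs are below) =====
def Claim_equal_halfzrk : Prop := ∀ (l : List Int), Dom_halfzrk l → Spec_halfzrk l (halfzrk l)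

-- ===== LEMMAS AND PROOFS =====

-- `Nat.toDigitsCore` appends to its accumulator.
lemma tdc_acc (b : Nat) : ∀ (f n : Nat) (l : List Char),
    Nat.toDigitsCore b f n l = Nat.toDigitsCore b f n [] ++ l := by
  intro f
  induction f with
  | zero => intro n l; simp [Nat.toDigitsCore]
  | succ f ih =>
    intro n l
    simp only [Nat.toDigitsCore]
    by_cases h : n / b = 0
    · simp [h]
    · simp only [h, if_false]
      rw [ih (n / b) (Nat.digitChar (n % b) :: l), ih (n / b) [Nat.digitChar (n % b)]]
      simp

-- Enough fuel makes `Nat.toDigitsCore` fuel-independent (base ≥ 2).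
lemma tdc_fuel (b : Nat) (hb : 2 ≤ b) : ∀ (f f' n : Nat) (l : List Char), n < f → n < f' →
    Nat.toDigitsCore b f n l = Nat.toDigitsCore b f' n l := by
  intro f
  induction f with
  | zero => intro f' n l h; omega
  | succ f ih =>
    intro f' n l h h'
    cases f' with
    | zero => omega
    | succ f' =>
      simp only [Nat.toDigitsCore]
      by_cases h0 : n / b = 0
      · simp [h0]
      · simp only [h0, if_false]
        have hn : 0 < n := by
          rcases Nat.eq_zero_or_pos n with rfl | hp
          · simp at h0
          · exact hp
        have hlt : n / b < n := Nat.div_lt_self hn (by omega)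
        have h1 : n / b < f := by omega
        have h2 : n / b < f' := by omega
        exact ih f' (n / b) _ h1 h2

-- Python's bin recurrence for `Nat.toDigits 2`.
lemma toDigits_two_step (n : Nat) (h : 2 ≤ n) :
    Nat.toDigits 2 n = Nat.toDigits 2 (n / 2) ++ [Nat.digitChar (n % 2)] := by
  have h0 : n / 2 ≠ 0 := by omega
  have hlt : n / 2 < n := Nat.div_lt_self (by omega) (by omega)
  unfold Nat.toDigits
  simp only [Nat.toDigitsCore, h0, if_false]
  rw [tdc_acc 2 n (n / 2) [Nat.digitChar (n % 2)]]
  congr 1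
  exact tdc_fuel 2 (by omega) n (n / 2 + 1) (n / 2) [] (by omega) (by omega)

lemma toDigits_two_ne_nil (n : Nat) : Nat.toDigits 2 n ≠ [] := by
  by_cases h : 2 ≤ n
  · rw [toDigits_two_step n h]; simp
  · interval_cases n <;> simp [Nat.toDigits, Nat.toDigitsCore]

lemma toDigits_two_digit (n : Nat) : ∀ c ∈ Nat.toDigits 2 n, c = '0' ∨ c = '1' := by
  induction n using Nat.strong_induction_on with
  | _ n ih =>
    by_cases h : 2 ≤ n
    · rw [toDigits_two_step n h]
      intro c hc
      rcases List.mem_append.mp hc with hc | hc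
      · exact ih (n / 2) (Nat.div_lt_self (by omega) (by omega)) c hc
      · have : c = Nat.digitChar (n % 2) := by simpa using hc
        have h2 : n % 2 = 0 ∨ n % 2 = 1 := by omega
        rcases h2 with h2 | h2 <;> simp [this, h2] <;> decide
    · interval_cases n <;> simp [Nat.toDigits, Nat.toDigitsCore, Nat.digitChar]

-- the character at position j of bin(i)[2:].zfill(n), as a bit of i
def bitc (b : Nat) : Char := if b = 1 then '1' else '0'

-- zfill on an unsigned digit string is a left pad
lemma zfill_digits (cs : List Char) (n : Nat) (hne : cs ≠ [])
    (hd : ∀ c ∈ cs, c = '0' ∨ c = '1') (hlen : cs.length ≤ n) :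
    PySem.Chars.zfill cs (n : Int) = List.replicate (n - cs.length) '0' ++ cs := by
  unfold PySem.Chars.zfill
  by_cases h : (n : Int) ≤ (cs.length : Int)
  · have : cs.length = n := by omega
    simp [this]
  · simp only [h, if_false]
    cases cs with
    | nil => exact absurd rfl hne
    | cons c rest =>
      have := hd c (by simp)
      have hc : ¬ (c = '+' ∨ c = '-') := by rcases this with h1 | h1 <;> simp [h1]
      simp [hc, Int.toNat_natCast]

-- length of padded string is n
lemma pad_length (n i : Nat) (h : i < 2 ^ n) (hn : 0 < n) :
    (List.replicate (n - (Nat.toDigits 2 i).length) '0' ++ Nat.toDigits 2 i).length = n := by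
  have := Nat.toDigits_length 2 i n hn h
  simp [List.length_append, List.length_replicate]
  omega

-- key lemma: digit j of the zero-filled binary string of i is bit (n-1-j) of i
lemma pad_getD : ∀ (n : Nat), ∀ (i j : Nat), i < 2 ^ n → j < n →
    (List.replicate (n - (Nat.toDigits 2 i).length) '0' ++ Nat.toDigits 2 i).getD j '0'
      = bitc (i / 2 ^ (n - 1 - j) % 2) := by
  intro n
  induction n with
  | zero => intro i j _ hj; omega
  | succ n ih =>
    intro i j hi hj
    by_cases h2 : 2 ≤ i
    · have hn : 0 < n := by
        by_contra hc
        have : n = 0 := by omega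
        subst this
        omega
      have hi2 : i / 2 < 2 ^ n := by
        have : i < 2 ^ n * 2 := by rw [← pow_succ]; exact hi
        omega
      have hlen2 : (Nat.toDigits 2 (i / 2)).length ≤ n := Nat.toDigits_length 2 (i / 2) n hn hi2
      rw [toDigits_two_step i h2]
      have harith : n + 1 - ((Nat.toDigits 2 (i / 2)).length + 1) = n - (Nat.toDigits 2 (i / 2)).length := by
        omega
      rw [List.length_append, List.length_singleton, harith, ← List.append_assoc]
      have hplen : (List.replicate (n - (Nat.toDigits 2 (i / 2)).length) '0' ++ Nat.toDigits 2 (i / 2)).length = n :=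
        pad_length n (i / 2) hi2 hn
      by_cases hjn : j < n
      · rw [List.getD_append _ _ _ _ (by omega)]
        rw [ih (i / 2) j hi2 hjn]
        have hexp : i / 2 / 2 ^ (n - 1 - j) = i / 2 ^ (n + 1 - 1 - j) := by
          rw [Nat.div_div_eq_div_mul, ← pow_succ']
          congr 2
          omega
        rw [hexp]
      · have hjeq : j = n := by omega
        rw [hjeq, List.getD_append_right _ _ _ _ (by omega), hplen, Nat.sub_self]
        have hmod : i % 2 = 0 ∨ i % 2 = 1 := by omega
        have hz : n + 1 - 1 - n = 0 := by omega
        rw [hz, pow_zero, Nat.div_one]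
        rcases hmod with hm | hm <;> simp [hm, bitc, Nat.digitChar]
    · have hi1 : i < 2 := by omega
      have hD : Nat.toDigits 2 i = [bitc i] := by
        interval_cases i <;> simp [Nat.toDigits, Nat.toDigitsCore, bitc, Nat.digitChar]
      rw [hD]
      simp only [List.length_singleton]
      have : n + 1 - 1 = n := by omega
      rw [this]
      by_cases hjn : j < n
      · rw [List.getD_append _ _ _ _ (by simpa using hjn), List.getD_replicate _ hjn]
        have hz : i / 2 ^ (n - j) = 0 := by
          apply Nat.div_eq_of_lt
          calc i < 2 := hi1
            _ = 2 ^ 1 := (pow_one 2).symm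
            _ ≤ 2 ^ (n - j) := Nat.pow_le_pow_right (by omega) (by omega)
        simp [hz, bitc]
      · have hjeq : j = n := by omega
        rw [hjeq, List.getD_append_right _ _ _ _ (by simp)]
        simp only [List.length_replicate, Nat.sub_self, List.getD_cons_zero]
        rw [pow_zero, Nat.div_one, Nat.mod_eq_of_lt hi1]

-- A's row as a width-indexed bit sum
def bsum (x : List Int) (w k : Nat) : Int :=
  ((List.range w).map (fun j => x.getD j 0 * ((k / 2 ^ (w - 1 - j) % 2 : Nat) : Int))).sum

lemma pyIntOfDigit_bitc (b : Nat) (hb : b < 2) : pyIntOfDigit (bitc b) = (b : Int) := by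
  interval_cases b <;> decide

lemma rowA_eq_bsum (x : List Int) (k : Nat) (hk : k < 2 ^ x.length) (hpos : 0 < x.length) :
    rowA x (k : Int) = bsum x x.length k := by
  have htb : PySem.Int.toBinChars (k : Int) = Nat.toDigits 2 k := by
    simp [PySem.Int.toBinChars]
  have hz : PySem.Chars.zfill (Nat.toDigits 2 k) ((x.length : Int)) =
      List.replicate (x.length - (Nat.toDigits 2 k).length) '0' ++ Nat.toDigits 2 k :=
    zfill_digits _ _ (toDigits_two_ne_nil k) (toDigits_two_digit k)
      (Nat.toDigits_length 2 k x.length hpos hk)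
  unfold rowA bsum
  simp only [PySem.List.len_eq, htb, hz, PySem.List.pyRange_one, List.map_map, Int.sub_zero,
    Int.toNat_natCast]
  apply congrArg List.sum
  apply List.map_congr_left
  intro j hj
  have hjn : j < x.length := by simpa using hj
  simp only [Function.comp, zero_add]
  simp only [PySem.List.pyGetD_natCast]
  rw [pad_getD x.length k j hk hjn, pyIntOfDigit_bitc _ (by omega)]

lemma bsum_zero (x : List Int) (w : Nat) : bsum x w 0 = 0 := by
  unfold bsum
  simp

-- A's side as a map of bsum
lemma sumsA_eq (x : List Int) :
    (PySem.List.pyRange 0 (PySem.List.len x) 1).foldl (fun acc i => acc ++ [rowA x i]) []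
      = (List.range x.length).map (bsum x x.length) := by
  rw [PySem.List.foldl_append_singleton_eq_map]
  simp only [PySem.List.len_eq, PySem.List.pyRange_one, List.map_map, Int.sub_zero,
    Int.toNat_natCast]
  apply List.map_congr_left
  intro k hk
  have hkn : k < x.length := by simpa using hk
  have hk2 : k < 2 ^ x.length := lt_of_lt_of_le hkn (Nat.le_of_lt Nat.lt_two_pow_self)
  simp only [Function.comp, zero_add]
  exact rowA_eq_bsum x k hk2 (by omega)

-- bit q of 2^t + r (r < 2^t): bit t is 1, every other bit is r's
lemma bit_add_pow (t r q : Nat) (hr : r < 2 ^ t) :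
    (2 ^ t + r) / 2 ^ q % 2 = if q = t then 1 else r / 2 ^ q % 2 := by
  have he : 0 < 2 ^ q := Nat.two_pow_pos q
  rcases lt_trichotomy q t with hlt | rfl | hgt
  · rw [if_neg (by omega)]
    have h1 : 2 ^ t = 2 * 2 ^ (t - q - 1) * 2 ^ q := by
      rw [mul_assoc, ← pow_add, ← pow_succ']
      congr 1
      omega
    calc (2 ^ t + r) / 2 ^ q % 2 = (r + 2 * 2 ^ (t - q - 1) * 2 ^ q) / 2 ^ q % 2 := by
          rw [h1, Nat.add_comm]
      _ = (r / 2 ^ q + 2 * 2 ^ (t - q - 1)) % 2 := by rw [Nat.add_mul_div_right _ _ he]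
      _ = (r / 2 ^ q + 2 ^ (t - q - 1) * 2) % 2 := by ring_nf
      _ = r / 2 ^ q % 2 := Nat.add_mul_mod_self_right _ _ _
  · rw [if_pos rfl]
    have hd : r / 2 ^ q = 0 := Nat.div_eq_of_lt hr
    rw [Nat.add_comm, Nat.add_div_right _ he, hd]
  · rw [if_neg (by omega)]
    have h1 : 2 ^ t + r < 2 ^ q := by
      calc 2 ^ t + r < 2 ^ t + 2 ^ t := by omega
        _ = 2 ^ (t + 1) := by rw [pow_succ]; ring
        _ ≤ 2 ^ q := Nat.pow_le_pow_right (by omega) (by omega)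
    rw [Nat.div_eq_of_lt h1, Nat.div_eq_of_lt (by omega)]

-- splitting the top bit off a bsum
lemma bsum_finset (x : List Int) (w k : Nat) :
    bsum x w k = ∑ j ∈ Finset.range w, x.getD j 0 * ((k / 2 ^ (w - 1 - j) % 2 : Nat) : Int) := by
  rfl

lemma bsum_add_pow (x : List Int) (n t r : Nat) (ht : t < n) (hr : r < 2 ^ t) :
    bsum x n (2 ^ t + r) = bsum x n r + x.getD (n - 1 - t) 0 := by
  rw [bsum_finset, bsum_finset]
  have hstep : ∀ j ∈ Finset.range n,
      x.getD j 0 * (((2 ^ t + r) / 2 ^ (n - 1 - j) % 2 : Nat) : Int)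
        = x.getD j 0 * ((r / 2 ^ (n - 1 - j) % 2 : Nat) : Int)
          + (if j = n - 1 - t then x.getD (n - 1 - t) 0 else 0) := by
    intro j hj
    have hjn : j < n := Finset.mem_range.mp hj
    rw [bit_add_pow t r (n - 1 - j) hr]
    by_cases hjt : j = n - 1 - t
    · have hq : n - 1 - j = t := by omega
      have hr0 : r / 2 ^ t = 0 := Nat.div_eq_of_lt hr
      subst hjt
      rw [if_pos hq, if_pos rfl, hq, hr0]
      simp
    · have hq : n - 1 - j ≠ t := by omega
      rw [if_neg hq, if_neg hjt, add_zero]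
  rw [Finset.sum_congr rfl hstep, Finset.sum_add_distrib,
    Finset.sum_ite_eq' (Finset.range n) (n - 1 - t) (fun _ => x.getD (n - 1 - t) 0),
    if_pos (Finset.mem_range.mpr (by omega))]

-- the growT invariant: starting from the bsum table of width 2^(k-1), with enough fuel,
-- growT returns the bsum table of some width m ≥ n
lemma growT_inv (x : List Int) : ∀ (fuel k : Nat), 1 ≤ k →
    x.length ≤ 2 ^ (k - 1) * 2 ^ fuel →
    ∃ m, x.length ≤ m ∧
      growT x fuel ((List.range (2 ^ (k - 1))).map (bsum x x.length)) k
        = (List.range m).map (bsum x x.length) := by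
  intro fuel
  induction fuel with
  | zero =>
    intro k hk hle
    exact ⟨2 ^ (k - 1), by simpa using hle, rfl⟩
  | succ fuel ih =>
    intro k hk hle
    by_cases hlt : 2 ^ (k - 1) < x.length
    · have hkx : k ≤ x.length := by
        have := Nat.lt_two_pow_self (n := k - 1)
        omega
      have hcast : ((x.length : Int) - (k : Int)) = ((x.length - k : Nat) : Int) := by
        omega
      have hstep : (List.range (2 ^ (k - 1))).map (bsum x x.length)
          ++ ((List.range (2 ^ (k - 1))).map (bsum x x.length)).map
              (fun s => s + PySem.List.pyGetD x ((x.length : Int) - (k : Int)) 0)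
          = (List.range (2 ^ k)).map (bsum x x.length) := by
        have h2 : 2 ^ k = 2 ^ (k - 1) + 2 ^ (k - 1) := by
          have hk1 : k - 1 + 1 = k := by omega
          calc 2 ^ k = 2 ^ (k - 1 + 1) := by rw [hk1]
            _ = 2 ^ (k - 1) * 2 := pow_succ 2 (k - 1)
            _ = 2 ^ (k - 1) + 2 ^ (k - 1) := by omega
        rw [h2, List.range_add, List.map_append]
        simp only [List.map_map]
        congr 1
        apply List.map_congr_left
        intro i hi
        have hi2 : i < 2 ^ (k - 1) := by simpa using hi
        simp only [Function.comp]
        rw [hcast, PySem.List.pyGetD_natCast,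
          bsum_add_pow x x.length (k - 1) i (by omega) hi2]
        congr 2
        omega
      rw [growT, if_pos (by simpa using hlt), hstep]
      have hle' : x.length ≤ 2 ^ (k + 1 - 1) * 2 ^ fuel := by
        have h2 : 2 ^ (k - 1) * 2 ^ (fuel + 1) = 2 ^ k * 2 ^ fuel := by
          have hk1 : k - 1 + 1 = k := by omega
          rw [pow_succ, mul_comm (2 ^ fuel) 2, ← mul_assoc, mul_comm _ 2, ← pow_succ', hk1]
        simpa [h2] using hle
      have := ih (k + 1) (by omega) hle'
      simpa using this
    · refine ⟨2 ^ (k - 1), by omega, ?_⟩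
      rw [growT, if_neg (by simpa using hlt)]

-- each half: A's list before sorting equals B's table truncated to n
lemma sums_eq (x : List Int) :
    (PySem.List.pyRange 0 (PySem.List.len x) 1).foldl (fun acc i => acc ++ [rowA x i]) []
      = (growT x (x.length + 1) [0] 1).take x.length := by
  have h0 : ([0] : List Int) = (List.range (2 ^ (1 - 1))).map (bsum x x.length) := by
    simp [bsum_zero]
  obtain ⟨m, hm, hg⟩ := growT_inv x (x.length + 1) 1 (by omega)
    (by
      have := Nat.lt_two_pow_self (n := x.length)
      calc x.length ≤ 2 ^ x.length := by omega
        _ ≤ 2 ^ (x.length + 1) := Nat.pow_le_pow_right (by omega) (by omega)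
        _ = 2 ^ (1 - 1) * 2 ^ (x.length + 1) := by ring)
  rw [sumsA_eq, h0, hg]
  have htake : (List.range m).take x.length = List.range x.length := by
    rw [List.take_range]
    congr 1
    omega
  rw [← List.map_take, htake]

-- ===== VERDICT (by name: the statement is the Claim_ definition above) =====
theorem halfzrk_spec : Claim_equal_halfzrk := by
  intro l _
  unfold Spec_halfzrk halfzrk halfzrk_alt sumsB
  simp only [sums_eq]
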